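-- pv_equiv track=rewrite | github.com/ofek9993/image-classification | classifier.py | SetlistIntoList
-- ===== SOURCE A (Python) =====
-- def SetlistIntoList(list):
--     # This function receives a list of sets\groups (for example: [{},{'person','cat},{'dog','cat'}],
--     # the function starts by checking if there are more than one group of equal power
--     # (in our example above we have 2 groups with the power of 2), if that case happens, we sort by the instance we find
--     # in our max_dict, if not - we change flag to 1 and continue sorting normally.
--
--     flag = 0
--     # power list is a list of integers that represents each set's power (in our example: [0,2,2] )
--     power_list = [len(x) for x in list]
--     # aux_list is  used to check if we have more than one group of equal power
--     aux_list = []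
--     # str_val is used to extract the strings from our sets and form them into a list
--     str_val = ''
--     # we iterate over power_list and append to the aux list the groups that have max power
--     for i in power_list:
--         if i == max(power_list):
--             aux_list.append(i)
--     # This if statement checks if we have more than one max group
--     if len(aux_list) > 1:
--         return 0
--     else:
--         return 1
-- ===== SOURCE B (Python) =====
-- def SetlistIntoList(list):
--     # Histogram of set sizes, then one lookup at the max size.
--     counts = {}
--     for x in list:
--         n = len(x)
--         counts[n] = counts.get(n, 0) + 1
--     if not counts:
--         return 1
--     return 0 if counts[max(counts)] > 1 else 1
-- ===== Notes on version B (the rewrite author's own statement) =====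
-- stated objective: alternative
-- what changed: Replaces the scan that recomputes max(power_list) on every iteration and appends maxima to an aux list with a single-pass size histogram (dict) from which the answer is a max over keys plus one lookup; measured runtime is comparable.
import Mathlib
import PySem

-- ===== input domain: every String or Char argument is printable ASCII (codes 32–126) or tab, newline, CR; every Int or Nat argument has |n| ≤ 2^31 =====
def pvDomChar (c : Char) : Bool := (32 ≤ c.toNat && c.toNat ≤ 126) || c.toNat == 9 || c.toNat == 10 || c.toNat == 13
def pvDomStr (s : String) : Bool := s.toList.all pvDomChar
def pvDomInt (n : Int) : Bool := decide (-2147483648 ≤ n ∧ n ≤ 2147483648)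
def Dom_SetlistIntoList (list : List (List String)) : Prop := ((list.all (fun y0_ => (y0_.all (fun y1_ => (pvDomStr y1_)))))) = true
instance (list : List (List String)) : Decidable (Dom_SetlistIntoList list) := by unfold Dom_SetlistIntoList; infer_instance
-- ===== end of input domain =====

-- B replaces A's quadratic scan (max recomputed per element, maxima appended to an aux list)
-- by a one-pass size histogram read off with a max over keys and one lookup (objective: alternative).

-- ===== PORT A =====
def SetlistIntoList (list : List (List String)) : Int :=
  let power_list : List Int := list.map (fun x => (x.length : Int))
  let aux_list : List Int :=
    power_list.foldl (fun acc i =>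
      if PySem.List.max? power_list (fun y => y) = some i then acc ++ [i] else acc) []
  if aux_list.length > 1 then 0 else 1

-- ===== PORT B =====
def SetlistIntoList_alt (list : List (List String)) : Int :=
  let counts : PySem.Dict Int Int :=
    list.foldl (fun d x =>
      d.insert (x.length : Int) (d.getD (x.length : Int) 0 + 1)) PySem.Dict.empty
  if counts.size = 0 then 1
  else
    match PySem.List.max? (PySem.Dict.keys counts) (fun y => y) with
    | some m => if counts.getD m 0 > 1 then 0 else 1
    | none => 1

-- ===== PRECONDITION & SPEC =====
def Spec_SetlistIntoList (list : List (List String)) (out : Int) : Prop := out = SetlistIntoList_alt list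
instance (list : List (List String)) (out : Int) : Decidable (Spec_SetlistIntoList list out) := by unfold Spec_SetlistIntoList; infer_instance

-- ===== CLAIM (what is proved, stated in full; the proofs are below) =====
def Claim_equal_SetlistIntoList : Prop := ∀ (list : List (List String)), Dom_SetlistIntoList list → Spec_SetlistIntoList list (SetlistIntoList list)

-- ===== LEMMAS AND PROOFS =====
theorem SetlistIntoList_eq_alt (list : List (List String)) :
    SetlistIntoList list = SetlistIntoList_alt list := by
  unfold SetlistIntoList SetlistIntoList_alt
  have hc : list.foldl (fun d x =>
      d.insert (x.length : Int) (d.getD (x.length : Int) 0 + 1)) PySem.Dict.empty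
      = PySem.Dict.counter (list.map (fun x => (x.length : Int))) := by
    rw [← PySem.Dict.foldl_insert_getD_add_one_eq_counter, List.foldl_map]
  simp only [hc]
  cases h : list.map (fun x => (x.length : Int)) with
  | nil =>
    simp [PySem.Dict.counter, PySem.Dict.size, PySem.Dict.empty]
  | cons m0 plt =>
    set pl := m0 :: plt with hpl
    have hmax : PySem.List.max? pl (fun y => y) = some (plt.foldl max m0) :=
      PySem.List.max?_id_cons ..
    set M := plt.foldl max m0 with hM
    -- A side
    rw [PySem.List.foldl_append_ite_eq_filter
      (p := fun i => PySem.List.max? pl (fun y => y) = some i)]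
    have hA : (pl.filter (fun i => decide (PySem.List.max? pl (fun y => y) = some i))).length
        = pl.count M := by
      rw [List.count_eq_length_filter]
      congr 1
      apply List.filter_congr
      intro i _
      rw [hmax]
      by_cases hi : i = M <;> simp [hi, Ne.symm]
    -- B side: size nonzero
    have hkeys : (PySem.Dict.counter pl).keys = PySem.Set.ofList pl :=
      PySem.Dict.keys_counter pl
    have hsize : (PySem.Dict.counter pl).size ≠ 0 := by
      have : (PySem.Dict.counter pl).keys.length = (PySem.Dict.counter pl).size := by
        simp [PySem.Dict.keys, PySem.Dict.size]
      rw [hkeys, hpl, PySem.Set.ofList_cons] at this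
      simp only [List.length_cons] at this
      rw [hpl]
      omega
    -- B's max over keys equals M
    obtain ⟨m', hm'⟩ : ∃ m', PySem.List.max? (PySem.Dict.counter pl).keys (fun y => y) = some m' := by
      cases hh : PySem.List.max? (PySem.Dict.counter pl).keys (fun y => y) with
      | none =>
        rw [PySem.List.max?_eq_none_iff] at hh
        exfalso; apply hsize
        simp [PySem.Dict.size]
        have := congrArg List.length hh
        simpa [PySem.Dict.keys] using this
      | some m' => exact ⟨m', rfl⟩
    have hm'M : m' = M := by
      have h1 : m' ∈ pl := by
        have := PySem.List.max?_mem hm'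
        rw [hkeys] at this
        exact (PySem.Set.mem_ofList _ _).1 this
      have h2 : M ∈ (PySem.Dict.counter pl).keys := by
        rw [hkeys]
        exact (PySem.Set.mem_ofList _ _).2 (PySem.List.max?_mem hmax)
      exact le_antisymm (PySem.List.max?_isMax hmax _ h1) (PySem.List.max?_isMax hm' _ h2)
    rw [if_neg hsize, hm', hm'M]
    simp only [List.nil_append, hA, PySem.Dict.getD_counter]
    by_cases hcnt : 1 < pl.count M
    · rw [if_pos hcnt, if_pos (by exact_mod_cast hcnt)]
    · rw [if_neg hcnt, if_neg (by exact_mod_cast hcnt)]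

-- ===== VERDICT (by name: the statement is the Claim_ definition above) =====
theorem SetlistIntoList_spec : Claim_equal_SetlistIntoList := by
  intro list _
  exact SetlistIntoList_eq_alt list
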